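-- pv_equiv track=rewrite | github.com/Heatman-coder/RSL-Strategie | core/data_pipeline.py | _get_ticker_priority
-- ===== SOURCE A (Python) =====
-- from typing import Any, Callable, Dict, List, Tuple, Optional
--
-- def _get_ticker_priority(ticker: Any) -> int:
--     t = str(ticker or "").strip().upper()
--     # 1. Prio: US-Original (kein Punkt) oder Native Maerkte (z.B. .OL fuer Norwegen)
--     native_suffixes = [".T", ".L", ".HK", ".TO", ".AX", ".OL", ".ST", ".CO", ".KS", ".KQ", ".TW", ".TWO", ".SS", ".SZ", ".SN"]
--     if any(t.endswith(s) for s in native_suffixes):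
--         return 1
--     if t and "." not in t: return 2
--     # 2. Prio: Xetra (.DE)
--     if t.endswith(".DE"): return 10
--     # 3. Prio: Andere deutsche Regionalboersen
--     if t.endswith((".F", ".SG", ".DU", ".BE", ".HM", ".MU")):
--         return 100
--     return 200
-- ===== SOURCE B (Python) =====
-- # Suffix trie over reversed suffixes: one backward character walk to the first dot
-- # replaces A's cascade of endswith scans (objective: alternative).
--
-- def _build_trie():
--     trie = {}
--     entries = [(s, 1) for s in ("T","L","HK","TO","AX","OL","ST","CO","KS","KQ","TW","TWO","SS","SZ","SN")]
--     entries.append(("DE", 10))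
--     entries += [(s, 100) for s in ("F","SG","DU","BE","HM","MU")]
--     for seg, prio in entries:
--         node = trie
--         for ch in seg[::-1] + ".":
--             node = node.setdefault(ch, {})
--         node["$"] = prio
--     return trie
--
-- _TRIE = _build_trie()
--
-- def _get_ticker_priority(ticker):
--     t = str(ticker or "").strip().upper()
--     node = _TRIE
--     for ch in reversed(t):
--         if ch == ".":
--             node = node.get(".") if node is not None else None
--             return node.get("$", 200) if node is not None else 200
--         node = node.get(ch) if node is not None else None
--     return 2 if t else 200
-- ===== Notes on version B (the rewrite author's own statement) =====
-- stated objective: alternative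
-- what changed: Replaces A's cascade of 22 endswith scans by a single backward character walk of the ticker through a trie of reversed suffixes, stopping at the first dot.
import Mathlib
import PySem

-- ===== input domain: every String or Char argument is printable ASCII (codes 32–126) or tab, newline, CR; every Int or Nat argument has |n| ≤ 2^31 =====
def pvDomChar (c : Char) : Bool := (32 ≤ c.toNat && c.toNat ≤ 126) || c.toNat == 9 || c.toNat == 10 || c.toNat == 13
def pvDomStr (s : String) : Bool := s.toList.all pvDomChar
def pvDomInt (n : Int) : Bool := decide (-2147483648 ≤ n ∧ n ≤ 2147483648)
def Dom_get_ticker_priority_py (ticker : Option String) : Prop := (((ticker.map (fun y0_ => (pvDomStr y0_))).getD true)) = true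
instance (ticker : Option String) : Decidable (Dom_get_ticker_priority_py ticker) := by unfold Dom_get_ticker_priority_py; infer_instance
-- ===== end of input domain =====

set_option maxHeartbeats 1000000

-- B replaces A's cascade of endswith scans by one backward character walk through a trie of reversed suffixes (objective: alternative).


-- ===== PORT A =====
def pvNativeSuffixes : List String := [".T", ".L", ".HK", ".TO", ".AX", ".OL", ".ST", ".CO", ".KS", ".KQ", ".TW", ".TWO", ".SS", ".SZ", ".SN"]

def get_ticker_priority_py (ticker : Option String) : Int :=
  -- t = str(ticker or "").strip().upper()  (ticker is None or a str, so 'ticker or ""' is getD "")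
  let t := PySem.Str.upper (PySem.Str.strip (ticker.getD ""))
  if pvNativeSuffixes.any (fun s => PySem.Str.endswith t s) then 1
  else if t ≠ "" ∧ ¬ (PySem.Str.isIn "." t = true) then 2
  else if PySem.Str.endswith t ".DE" then 10
  else if [".F", ".SG", ".DU", ".BE", ".HM", ".MU"].any (fun s => PySem.Str.endswith t s) then 100
  else 200

-- ===== PORT B =====
-- Source B's trie: a node is a payload ("$" entry) plus an ordered child list (the dict's other keys)
mutual
inductive PvTrie where
  | mk : Option Int → PvChildren → PvTrie
inductive PvChildren where
  | nil : PvChildren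
  | cons : Char → PvTrie → PvChildren → PvChildren
end

-- node.get(ch)
def pvChildGet : PvChildren → Char → Option PvTrie
  | .nil, _ => none
  | .cons c' t rest, c => if c' = c then some t else pvChildGet rest c

-- node.setdefault(ch, …) followed by mutating the child in place: replace if present, append if absent
def pvChildSet : PvChildren → Char → PvTrie → PvChildren
  | .nil, c, t => .cons c t .nil
  | .cons c' t' rest, c, t => if c' = c then .cons c t rest else .cons c' t' (pvChildSet rest c t)

-- the inner 'for ch in seg[::-1] + ".": node = node.setdefault(ch, {})' then 'node["$"] = prio'
def pvTrieInsert (tr : PvTrie) (path : List Char) (prio : Int) : PvTrie :=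
  match tr, path with
  | .mk _ cs, [] => .mk (some prio) cs
  | .mk p cs, c :: rest =>
      .mk p (pvChildSet cs c (pvTrieInsert ((pvChildGet cs c).getD (.mk none .nil)) rest prio))

def pvEntries : List (String × Int) :=
  [("T",1),("L",1),("HK",1),("TO",1),("AX",1),("OL",1),("ST",1),("CO",1),("KS",1),("KQ",1),
   ("TW",1),("TWO",1),("SS",1),("SZ",1),("SN",1),("DE",10),("F",100),("SG",100),("DU",100),
   ("BE",100),("HM",100),("MU",100)]

def pvTrie : PvTrie :=
  pvEntries.foldl (fun tr e => pvTrieInsert tr (e.1.toList.reverse ++ ['.']) e.2) (.mk none .nil)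

-- the 'for ch in reversed(t)' loop of Source B
def pvWalk (node : Option PvTrie) (chars : List Char) (nonempty : Bool) : Int :=
  match chars with
  | [] => if nonempty then 2 else 200
  | c :: rest =>
    if c = '.' then
      match node with
      | none => 200
      | some (.mk _ cs) =>
        match pvChildGet cs '.' with
        | none => 200
        | some (.mk payload _) => payload.getD 200
    else
      pvWalk (match node with | none => none | some (.mk _ cs) => pvChildGet cs c) rest nonempty

def get_ticker_priority_py_alt (ticker : Option String) : Int :=
  let t := PySem.Str.upper (PySem.Str.strip (ticker.getD ""))
  pvWalk (some pvTrie) t.toList.reverse (t != "")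

-- ===== PRECONDITION & SPEC =====
def Spec_get_ticker_priority_py (ticker : Option String) (out : Int) : Prop := out = get_ticker_priority_py_alt ticker
instance (ticker : Option String) (out : Int) : Decidable (Spec_get_ticker_priority_py ticker out) := by unfold Spec_get_ticker_priority_py; infer_instance

-- ===== CLAIM (what is proved, stated in full; the proofs are below) =====
def Claim_equal_get_ticker_priority_py : Prop := ∀ (ticker : Option String), Dom_get_ticker_priority_py ticker → Spec_get_ticker_priority_py ticker (get_ticker_priority_py ticker)

-- ===== LEMMAS AND PROOFS =====

-- lookup of a whole path in a (possibly absent) trie node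
def pvOLookup (node : Option PvTrie) (path : List Char) : Option Int :=
  match node, path with
  | none, _ => none
  | some (.mk p _), [] => p
  | some (.mk _ cs), c :: rest => pvOLookup (pvChildGet cs c) rest

theorem pv_olookup_empty (q : List Char) : pvOLookup (some (.mk none .nil)) q = none := by
  cases q <;> simp [pvOLookup, pvChildGet]

theorem pv_childGet_childSet (cs : PvChildren) (c c' : Char) (t : PvTrie) :
    pvChildGet (pvChildSet cs c t) c' = if c' = c then some t else pvChildGet cs c' := by
  match cs with
  | .nil =>
      show pvChildGet (.cons c t .nil) c' = _
      by_cases h : c' = c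
      · subst h; simp [pvChildGet]
      · rw [if_neg h]
        show (if c = c' then some t else pvChildGet .nil c') = pvChildGet .nil c'
        rw [if_neg (fun hh => h hh.symm)]
  | .cons d td rest =>
      have ih := pv_childGet_childSet rest c c' t
      by_cases hdc : d = c
      · subst hdc
        rw [show pvChildSet (.cons d td rest) d t = .cons d t rest from by
          simp [pvChildSet]]
        by_cases h : c' = d
        · subst h
          show (if c' = c' then some t else _) = if c' = c' then some t else _
          rw [if_pos rfl, if_pos rfl]
        · rw [if_neg h]
          show (if d = c' then some t else pvChildGet rest c') = pvChildGet (.cons d td rest) c'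
          rw [if_neg (fun hh => h hh.symm)]
          show _ = if d = c' then some td else pvChildGet rest c'
          rw [if_neg (fun hh => h hh.symm)]
      · rw [show pvChildSet (.cons d td rest) c t = .cons d td (pvChildSet rest c t) from by
          simp [pvChildSet, hdc]]
        by_cases h : d = c'
        · subst h
          show (if d = d then some td else _) = if d = c then some t else pvChildGet (.cons d td rest) d
          rw [if_pos rfl, if_neg hdc]
          show some td = if d = d then some td else _
          rw [if_pos rfl]
        · show (if d = c' then some td else pvChildGet (pvChildSet rest c t) c') = _
          rw [if_neg h, ih]
          by_cases hcc : c' = c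
          · rw [if_pos hcc, if_pos hcc]
          · rw [if_neg hcc, if_neg hcc]
            show _ = if d = c' then some td else pvChildGet rest c'
            rw [if_neg h]

theorem pv_olookup_insert (path : List Char) (tr : PvTrie) (prio : Int) (q : List Char) :
    pvOLookup (some (pvTrieInsert tr path prio)) q =
      if q = path then some prio else pvOLookup (some tr) q := by
  induction path generalizing tr q with
  | nil =>
      obtain ⟨p, cs⟩ := tr
      cases q with
      | nil => simp [pvTrieInsert, pvOLookup]
      | cons c qr => simp [pvTrieInsert, pvOLookup]
  | cons c pr ih =>
      obtain ⟨p, cs⟩ := tr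
      cases q with
      | nil => simp [pvTrieInsert, pvOLookup]
      | cons c' qr =>
          have hstep : pvOLookup (some (pvTrieInsert (PvTrie.mk p cs) (c :: pr) prio)) (c' :: qr)
              = pvOLookup (pvChildGet (pvChildSet cs c
                  (pvTrieInsert ((pvChildGet cs c).getD (.mk none .nil)) pr prio)) c') qr := rfl
          have hrhs : pvOLookup (some (PvTrie.mk p cs)) (c' :: qr)
              = pvOLookup (pvChildGet cs c') qr := rfl
          rw [hstep, pv_childGet_childSet, hrhs]
          by_cases hc : c' = c
          · subst hc
            rw [if_pos rfl, ih]
            have hold : pvOLookup (some ((pvChildGet cs c').getD (.mk none .nil))) qr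
                = pvOLookup (pvChildGet cs c') qr := by
              cases h : pvChildGet cs c' with
              | none => simp [pv_olookup_empty, pvOLookup]
              | some ch => simp
            rw [hold]
            by_cases hq : qr = pr <;> simp [hq]
          · rw [if_neg hc, if_neg (by simp [hc])]

-- walking past characters none of which is a dot
theorem pv_walk_no_dot (chars : List Char) (node : Option PvTrie) (b : Bool)
    (h : '.' ∉ chars) : pvWalk node chars b = if b then 2 else 200 := by
  induction chars generalizing node with
  | nil => simp [pvWalk]
  | cons c rest ih =>
      have hc : ¬ c = '.' := fun hh => h (hh ▸ List.mem_cons_self)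
      simp only [pvWalk, if_neg hc]
      exact ih _ (fun hm => h (List.mem_cons_of_mem _ hm))

-- the walk stops at the first dot and is exactly a trie lookup of the prefix plus the dot
theorem pv_walk_dot (pre : List Char) (node : Option PvTrie) (rest : List Char) (b : Bool)
    (h : '.' ∉ pre) :
    pvWalk node (pre ++ '.' :: rest) b = (pvOLookup node (pre ++ ['.'])).getD 200 := by
  induction pre generalizing node with
  | nil =>
      cases node with
      | none => simp [pvWalk, pvOLookup]
      | some tr =>
          obtain ⟨p, cs⟩ := tr
          simp only [List.nil_append, pvWalk]
          simp only [pvOLookup]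
          cases hg : pvChildGet cs '.' with
          | none => simp [pvOLookup]
          | some ch => obtain ⟨pp, ccs⟩ := ch; simp [pvOLookup]
  | cons c pre' ih =>
      have hc : ¬ c = '.' := fun hh => h (hh ▸ List.mem_cons_self)
      have h' : '.' ∉ pre' := fun hm => h (List.mem_cons_of_mem _ hm)
      cases node with
      | none => simp only [List.cons_append, pvWalk, if_neg hc]; simpa [pvOLookup] using ih none h'
      | some tr =>
          obtain ⟨p, cs⟩ := tr
          simp only [List.cons_append, pvWalk, if_neg hc, pvOLookup]
          exact ih _ h'

-- the concrete trie's lookup table on paths of the shape X.reverse ++ ['.']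
theorem pv_trie_table (X : List Char) :
    pvOLookup (some pvTrie) (X.reverse ++ ['.']) =
      if X = ['M','U'] then some 100 else if X = ['H','M'] then some 100
      else if X = ['B','E'] then some 100 else if X = ['D','U'] then some 100
      else if X = ['S','G'] then some 100 else if X = ['F'] then some 100
      else if X = ['D','E'] then some 10 else if X = ['S','N'] then some 1
      else if X = ['S','Z'] then some 1 else if X = ['S','S'] then some 1
      else if X = ['T','W','O'] then some 1 else if X = ['T','W'] then some 1
      else if X = ['K','Q'] then some 1 else if X = ['K','S'] then some 1
      else if X = ['C','O'] then some 1 else if X = ['S','T'] then some 1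
      else if X = ['O','L'] then some 1 else if X = ['A','X'] then some 1
      else if X = ['T','O'] then some 1 else if X = ['H','K'] then some 1
      else if X = ['L'] then some 1 else if X = ['T'] then some 1 else none := by
  have hcond : ∀ (s : List Char), (X.reverse ++ ['.'] = s.reverse ++ ['.']) ↔ X = s := by
    intro s
    constructor
    · intro hh
      have := List.append_cancel_right hh
      exact List.reverse_injective this
    · intro hh; rw [hh]
  simp only [pvTrie, pvEntries, List.foldl_cons, List.foldl_nil]
  simp only [pv_olookup_insert, pv_olookup_empty]
  simp only [show ("T":String).toList = ['T'] from rfl, show ("L":String).toList = ['L'] from rfl,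
    show ("HK":String).toList = ['H','K'] from rfl, show ("TO":String).toList = ['T','O'] from rfl,
    show ("AX":String).toList = ['A','X'] from rfl, show ("OL":String).toList = ['O','L'] from rfl,
    show ("ST":String).toList = ['S','T'] from rfl, show ("CO":String).toList = ['C','O'] from rfl,
    show ("KS":String).toList = ['K','S'] from rfl, show ("KQ":String).toList = ['K','Q'] from rfl,
    show ("TW":String).toList = ['T','W'] from rfl, show ("TWO":String).toList = ['T','W','O'] from rfl,
    show ("SS":String).toList = ['S','S'] from rfl, show ("SZ":String).toList = ['S','Z'] from rfl,
    show ("SN":String).toList = ['S','N'] from rfl, show ("DE":String).toList = ['D','E'] from rfl,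
    show ("F":String).toList = ['F'] from rfl, show ("SG":String).toList = ['S','G'] from rfl,
    show ("DU":String).toList = ['D','U'] from rfl, show ("BE":String).toList = ['B','E'] from rfl,
    show ("HM":String).toList = ['H','M'] from rfl, show ("MU":String).toList = ['M','U'] from rfl]
  simp only [hcond]

-- a string ends with '.' :: Y (Y dot-free) iff Y is exactly the segment after the last dot
theorem pv_suffix_iff (l X : List Char) (hX : '.' ∉ X) (hl : '.' ∈ l) :
    (('.' :: X) <:+ l) ↔ X = (l.reverse.takeWhile (fun c => c ≠ '.')).reverse := by
  rw [← List.reverse_prefix, List.reverse_cons]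
  constructor
  · rintro ⟨rest, hrest⟩
    have htw : List.takeWhile (fun c => decide (c ≠ '.')) l.reverse = X.reverse := by
      rw [← hrest, List.append_assoc, List.takeWhile_append]
      have hall : List.takeWhile (fun c => decide (c ≠ '.')) X.reverse = X.reverse :=
        List.takeWhile_eq_self_iff.mpr (by intro x hx; simp; intro h; exact hX (h ▸ (List.mem_reverse.mp hx)))
      rw [hall]; simp
    rw [htw]; simp
  · intro hXeq
    have hne : List.dropWhile (fun c => decide (c ≠ '.')) l.reverse ≠ [] := by
      intro hnil
      have heq := List.takeWhile_append_dropWhile (p := fun c => decide (c ≠ '.')) (l := l.reverse)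
      rw [hnil, List.append_nil] at heq
      have hmem : '.' ∈ List.takeWhile (fun c => decide (c ≠ '.')) l.reverse := by
        rw [heq]; simpa using hl
      have := List.mem_takeWhile_imp hmem; simp at this
    obtain ⟨c, tl, hct⟩ := List.exists_cons_of_ne_nil hne
    have hc : c = '.' := by
      have h2 := List.head_dropWhile_not (fun c => decide (c ≠ '.')) hne
      simp only [hct, List.head_cons] at h2; simpa using h2
    refine ⟨tl, ?_⟩
    conv_rhs => rw [← List.takeWhile_append_dropWhile (p := fun c => decide (c ≠ '.')) (l := l.reverse)]
    rw [hct, hc, hXeq]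
    simp

-- the two function bodies agree for every string t
theorem pv_main (t : String) :
    (if pvNativeSuffixes.any (fun s => PySem.Str.endswith t s) then (1 : Int)
     else if t ≠ "" ∧ ¬ (PySem.Str.isIn "." t = true) then 2
     else if PySem.Str.endswith t ".DE" then 10
     else if [".F", ".SG", ".DU", ".BE", ".HM", ".MU"].any (fun s => PySem.Str.endswith t s) then 100
     else 200)
    = pvWalk (some pvTrie) t.toList.reverse (t != "") := by
  by_cases hdot : '.' ∈ t.toList
  · -- t contains a dot: decompose the reversed list at its first dot
    have hIn : PySem.Str.isIn "." t = true := by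
      rw [PySem.Str.isIn_eq, PySem.Chars.isIn_iff_infix]
      obtain ⟨p, q, hpq⟩ := List.append_of_mem hdot
      exact ⟨p, q, by simp [hpq]⟩
    set X : List Char := (t.toList.reverse.takeWhile (fun c => decide (c ≠ '.'))).reverse with hXdef
    have hXdot : '.' ∉ X := by
      intro hm
      have := List.mem_takeWhile_imp (List.mem_reverse.mp hm)
      simp at this
    -- reversed t = takeWhile ++ '.' :: tail
    have hrdot : '.' ∈ t.toList.reverse := List.mem_reverse.mpr hdot
    have hne : List.dropWhile (fun c => decide (c ≠ '.')) t.toList.reverse ≠ [] := by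
      intro hnil
      have heq := List.takeWhile_append_dropWhile (p := fun c => decide (c ≠ '.')) (l := t.toList.reverse)
      rw [hnil, List.append_nil] at heq
      have hmem : '.' ∈ List.takeWhile (fun c => decide (c ≠ '.')) t.toList.reverse := by
        rw [heq]; exact hrdot
      have := List.mem_takeWhile_imp hmem; simp at this
    obtain ⟨c, tl, hct⟩ := List.exists_cons_of_ne_nil hne
    have hc : c = '.' := by
      have h2 := List.head_dropWhile_not (fun c => decide (c ≠ '.')) hne
      simp only [hct, List.head_cons] at h2; simpa using h2
    have hsplit : t.toList.reverse = X.reverse ++ '.' :: tl := by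
      conv_lhs => rw [← List.takeWhile_append_dropWhile (p := fun c => decide (c ≠ '.')) (l := t.toList.reverse)]
      rw [hct, hc, hXdef, List.reverse_reverse]
    have hXrev : '.' ∉ X.reverse := fun hm => hXdot (List.mem_reverse.mp hm)
    rw [hsplit, pv_walk_dot _ _ _ _ hXrev, pv_trie_table]
    -- each endswith test is a statement about X
    have hkey : ∀ (s : String) (Y : List Char), s.toList = '.' :: Y → '.' ∉ Y →
        (PySem.Str.endswith t s = true ↔ X = Y) := by
      intro s Y hs hY
      rw [PySem.Str.endswith_eq, hs, PySem.Chars.endswith_iff, pv_suffix_iff _ _ hY hdot, hXdef, eq_comm]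
    have e0 : PySem.Str.endswith t ".T" = true ↔ X = ['T'] := hkey ".T" ['T'] rfl (by decide)
    have e1 : PySem.Str.endswith t ".L" = true ↔ X = ['L'] := hkey ".L" ['L'] rfl (by decide)
    have e2 : PySem.Str.endswith t ".HK" = true ↔ X = ['H', 'K'] := hkey ".HK" ['H', 'K'] rfl (by decide)
    have e3 : PySem.Str.endswith t ".TO" = true ↔ X = ['T', 'O'] := hkey ".TO" ['T', 'O'] rfl (by decide)
    have e4 : PySem.Str.endswith t ".AX" = true ↔ X = ['A', 'X'] := hkey ".AX" ['A', 'X'] rfl (by decide)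
    have e5 : PySem.Str.endswith t ".OL" = true ↔ X = ['O', 'L'] := hkey ".OL" ['O', 'L'] rfl (by decide)
    have e6 : PySem.Str.endswith t ".ST" = true ↔ X = ['S', 'T'] := hkey ".ST" ['S', 'T'] rfl (by decide)
    have e7 : PySem.Str.endswith t ".CO" = true ↔ X = ['C', 'O'] := hkey ".CO" ['C', 'O'] rfl (by decide)
    have e8 : PySem.Str.endswith t ".KS" = true ↔ X = ['K', 'S'] := hkey ".KS" ['K', 'S'] rfl (by decide)
    have e9 : PySem.Str.endswith t ".KQ" = true ↔ X = ['K', 'Q'] := hkey ".KQ" ['K', 'Q'] rfl (by decide)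
    have e10 : PySem.Str.endswith t ".TW" = true ↔ X = ['T', 'W'] := hkey ".TW" ['T', 'W'] rfl (by decide)
    have e11 : PySem.Str.endswith t ".TWO" = true ↔ X = ['T', 'W', 'O'] := hkey ".TWO" ['T', 'W', 'O'] rfl (by decide)
    have e12 : PySem.Str.endswith t ".SS" = true ↔ X = ['S', 'S'] := hkey ".SS" ['S', 'S'] rfl (by decide)
    have e13 : PySem.Str.endswith t ".SZ" = true ↔ X = ['S', 'Z'] := hkey ".SZ" ['S', 'Z'] rfl (by decide)
    have e14 : PySem.Str.endswith t ".SN" = true ↔ X = ['S', 'N'] := hkey ".SN" ['S', 'N'] rfl (by decide)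
    have e15 : PySem.Str.endswith t ".DE" = true ↔ X = ['D', 'E'] := hkey ".DE" ['D', 'E'] rfl (by decide)
    have e16 : PySem.Str.endswith t ".F" = true ↔ X = ['F'] := hkey ".F" ['F'] rfl (by decide)
    have e17 : PySem.Str.endswith t ".SG" = true ↔ X = ['S', 'G'] := hkey ".SG" ['S', 'G'] rfl (by decide)
    have e18 : PySem.Str.endswith t ".DU" = true ↔ X = ['D', 'U'] := hkey ".DU" ['D', 'U'] rfl (by decide)
    have e19 : PySem.Str.endswith t ".BE" = true ↔ X = ['B', 'E'] := hkey ".BE" ['B', 'E'] rfl (by decide)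
    have e20 : PySem.Str.endswith t ".HM" = true ↔ X = ['H', 'M'] := hkey ".HM" ['H', 'M'] rfl (by decide)
    have e21 : PySem.Str.endswith t ".MU" = true ↔ X = ['M', 'U'] := hkey ".MU" ['M', 'U'] rfl (by decide)
    simp only [hIn, not_true, and_false, if_false,
      pvNativeSuffixes, List.any_cons, List.any_nil, Bool.or_eq_true,
      e0, e1, e2, e3, e4, e5, e6, e7, e8, e9, e10, e11, e12, e13, e14, e15, e16, e17, e18, e19, e20, e21]
    clear_value X
    clear hkey e0 e1 e2 e3 e4 e5 e6 e7 e8 e9 e10 e11 e12 e13 e14 e15 e16 e17 e18 e19 e20 e21 hIn hdot hXdot hrdot hne hct hsplit hXrev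
    by_cases h0 : X = ['T']
    · simp [h0]
    by_cases h1 : X = ['L']
    · simp [h1]
    by_cases h2 : X = ['H', 'K']
    · simp [h2]
    by_cases h3 : X = ['T', 'O']
    · simp [h3]
    by_cases h4 : X = ['A', 'X']
    · simp [h4]
    by_cases h5 : X = ['O', 'L']
    · simp [h5]
    by_cases h6 : X = ['S', 'T']
    · simp [h6]
    by_cases h7 : X = ['C', 'O']
    · simp [h7]
    by_cases h8 : X = ['K', 'S']
    · simp [h8]
    by_cases h9 : X = ['K', 'Q']
    · simp [h9]
    by_cases h10 : X = ['T', 'W']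
    · simp [h10]
    by_cases h11 : X = ['T', 'W', 'O']
    · simp [h11]
    by_cases h12 : X = ['S', 'S']
    · simp [h12]
    by_cases h13 : X = ['S', 'Z']
    · simp [h13]
    by_cases h14 : X = ['S', 'N']
    · simp [h14]
    by_cases h15 : X = ['D', 'E']
    · simp [h15]
    by_cases h16 : X = ['F']
    · simp [h16]
    by_cases h17 : X = ['S', 'G']
    · simp [h17]
    by_cases h18 : X = ['D', 'U']
    · simp [h18]
    by_cases h19 : X = ['B', 'E']
    · simp [h19]
    by_cases h20 : X = ['H', 'M']
    · simp [h20]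
    by_cases h21 : X = ['M', 'U']
    · simp [h21]
    simp [h0, h1, h2, h3, h4, h5, h6, h7, h8, h9, h10, h11, h12, h13, h14, h15, h16, h17, h18, h19, h20, h21]
  · -- no dot in t: every endswith test is false, and the walk never meets a dot
    have hIn : PySem.Str.isIn "." t = false := by
      rw [PySem.Str.isIn_eq]
      apply (PySem.Chars.isIn_eq_false_iff _ _).mpr
      intro hinf
      exact hdot (hinf.subset (by simp))
    have hends : ∀ (s : String) (Y : List Char), s.toList = '.' :: Y → PySem.Str.endswith t s = false := by
      intro s Y hs
      rw [PySem.Str.endswith_eq, hs]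
      apply Bool.eq_false_iff.mpr
      intro htrue
      exact hdot ((PySem.Chars.endswith_iff _ _ |>.mp htrue).subset (by simp))
    have f0 : PySem.Str.endswith t ".T" = false := hends ".T" ['T'] rfl
    have f1 : PySem.Str.endswith t ".L" = false := hends ".L" ['L'] rfl
    have f2 : PySem.Str.endswith t ".HK" = false := hends ".HK" ['H', 'K'] rfl
    have f3 : PySem.Str.endswith t ".TO" = false := hends ".TO" ['T', 'O'] rfl
    have f4 : PySem.Str.endswith t ".AX" = false := hends ".AX" ['A', 'X'] rfl
    have f5 : PySem.Str.endswith t ".OL" = false := hends ".OL" ['O', 'L'] rfl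
    have f6 : PySem.Str.endswith t ".ST" = false := hends ".ST" ['S', 'T'] rfl
    have f7 : PySem.Str.endswith t ".CO" = false := hends ".CO" ['C', 'O'] rfl
    have f8 : PySem.Str.endswith t ".KS" = false := hends ".KS" ['K', 'S'] rfl
    have f9 : PySem.Str.endswith t ".KQ" = false := hends ".KQ" ['K', 'Q'] rfl
    have f10 : PySem.Str.endswith t ".TW" = false := hends ".TW" ['T', 'W'] rfl
    have f11 : PySem.Str.endswith t ".TWO" = false := hends ".TWO" ['T', 'W', 'O'] rfl
    have f12 : PySem.Str.endswith t ".SS" = false := hends ".SS" ['S', 'S'] rfl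
    have f13 : PySem.Str.endswith t ".SZ" = false := hends ".SZ" ['S', 'Z'] rfl
    have f14 : PySem.Str.endswith t ".SN" = false := hends ".SN" ['S', 'N'] rfl
    have f15 : PySem.Str.endswith t ".DE" = false := hends ".DE" ['D', 'E'] rfl
    have f16 : PySem.Str.endswith t ".F" = false := hends ".F" ['F'] rfl
    have f17 : PySem.Str.endswith t ".SG" = false := hends ".SG" ['S', 'G'] rfl
    have f18 : PySem.Str.endswith t ".DU" = false := hends ".DU" ['D', 'U'] rfl
    have f19 : PySem.Str.endswith t ".BE" = false := hends ".BE" ['B', 'E'] rfl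
    have f20 : PySem.Str.endswith t ".HM" = false := hends ".HM" ['H', 'M'] rfl
    have f21 : PySem.Str.endswith t ".MU" = false := hends ".MU" ['M', 'U'] rfl
    have hwalk : pvWalk (some pvTrie) t.toList.reverse (t != "") = if (t != "") then 2 else 200 :=
      pv_walk_no_dot _ _ _ (fun hm => hdot (List.mem_reverse.mp hm))
    rw [hwalk]
    simp only [hIn, pvNativeSuffixes, List.any_cons, List.any_nil, Bool.or_eq_true,
      f0, f1, f2, f3, f4, f5, f6, f7, f8, f9, f10, f11, f12, f13, f14, f15, f16, f17, f18, f19, f20, f21]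
    by_cases hT : t = "" <;> simp [hT]

-- ===== VERDICT (by name: the statement is the Claim_ definition above) =====
theorem get_ticker_priority_py_spec : Claim_equal_get_ticker_priority_py := by
  intro ticker _
  unfold Spec_get_ticker_priority_py get_ticker_priority_py get_ticker_priority_py_alt
  exact pv_main _
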